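-- pv_equiv track=rewrite | github.com/tungedng2710/DMOM-RAG | tonrag/dataset.py | suggest_fields
-- ===== SOURCE A (Python) =====
-- from typing import Any, Dict, List, Tuple, Optional
--
-- def suggest_fields(columns: List[str]) -> Dict[str, List[str]]:
--     cols_lower = [c.lower() for c in columns]
--     guesses = {
--         "text": [c for c in columns if c.lower() in ("text", "context", "passage", "document", "content", "reference")],
--         "id": [c for c in columns if c.lower() in ("id", "doc_id", "uid", "no")],
--         "question": [c for c in columns if c.lower() in ("question", "query", "q", "instruction")],
--         "answer": [c for c in columns if c.lower() in ("answer", "answers", "a", "output")],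
--     }
--     return guesses
-- ===== SOURCE B (Python) =====
-- def suggest_fields(columns):
--     text, ids, question, answer = [], [], [], []
--     for c in columns:
--         l = c.lower()
--         if l in ("text", "context", "passage", "document", "content", "reference"):
--             text.append(c)
--         elif l in ("id", "doc_id", "uid", "no"):
--             ids.append(c)
--         elif l in ("question", "query", "q", "instruction"):
--             question.append(c)
--         elif l in ("answer", "answers", "a", "output"):
--             answer.append(c)
--     return {"text": text, "id": ids, "question": question, "answer": answer}
-- ===== Notes on version B (the rewrite author's own statement) =====
-- stated objective: faster
-- what changed: Replaces A's four separate filtering passes over columns (each recomputing c.lower()) with a single pass that lowers each column once and dispatches it into one of four accumulator lists via an if/elif chain.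
import Mathlib
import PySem

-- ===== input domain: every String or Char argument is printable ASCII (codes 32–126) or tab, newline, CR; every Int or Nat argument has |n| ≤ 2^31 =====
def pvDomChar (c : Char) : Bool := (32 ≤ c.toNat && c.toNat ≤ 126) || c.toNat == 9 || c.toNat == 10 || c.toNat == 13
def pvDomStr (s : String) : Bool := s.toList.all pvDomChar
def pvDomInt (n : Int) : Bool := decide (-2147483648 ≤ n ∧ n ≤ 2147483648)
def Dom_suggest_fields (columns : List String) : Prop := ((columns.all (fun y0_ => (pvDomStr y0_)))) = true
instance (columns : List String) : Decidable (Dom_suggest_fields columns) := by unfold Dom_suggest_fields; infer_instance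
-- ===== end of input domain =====

-- B replaces A's four filtering passes with one pass dispatching each column (lowered once) into four accumulators: simpler single traversal.


-- ===== PORT A =====
-- the four literal name groups from A's source (shared constants)
def textNames : List String := ["text", "context", "passage", "document", "content", "reference"]
def idNames : List String := ["id", "doc_id", "uid", "no"]
def questionNames : List String := ["question", "query", "q", "instruction"]
def answerNames : List String := ["answer", "answers", "a", "output"]

def suggest_fields (columns : List String) : List (String × List String) :=
  let _cols_lower := columns.map (fun c => PySem.Str.lower c)
  [("text", columns.filter (fun c => textNames.contains (PySem.Str.lower c))),
   ("id", columns.filter (fun c => idNames.contains (PySem.Str.lower c))),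
   ("question", columns.filter (fun c => questionNames.contains (PySem.Str.lower c))),
   ("answer", columns.filter (fun c => answerNames.contains (PySem.Str.lower c)))]

-- ===== PORT B =====
def sfStep (s : List String × List String × List String × List String) (c : String) :
    List String × List String × List String × List String :=
  let l := PySem.Str.lower c
  if textNames.contains l then (s.1 ++ [c], s.2.1, s.2.2.1, s.2.2.2)
  else if idNames.contains l then (s.1, s.2.1 ++ [c], s.2.2.1, s.2.2.2)
  else if questionNames.contains l then (s.1, s.2.1, s.2.2.1 ++ [c], s.2.2.2)
  else if answerNames.contains l then (s.1, s.2.1, s.2.2.1, s.2.2.2 ++ [c])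
  else s

def suggest_fields_alt (columns : List String) : List (String × List String) :=
  let r := columns.foldl sfStep ([], [], [], [])
  [("text", r.1), ("id", r.2.1), ("question", r.2.2.1), ("answer", r.2.2.2)]

-- ===== PRECONDITION & SPEC =====
def Spec_suggest_fields (columns : List String) (out : List (String × List String)) : Prop := out = suggest_fields_alt columns
instance (columns : List String) (out : List (String × List String)) : Decidable (Spec_suggest_fields columns out) := by unfold Spec_suggest_fields; infer_instance

-- ===== CLAIM (what is proved, stated in full; the proofs are below) =====
def Claim_equal_suggest_fields : Prop := ∀ (columns : List String), Dom_suggest_fields columns → Spec_suggest_fields columns (suggest_fields columns)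

-- ===== LEMMAS AND PROOFS =====

-- the four name groups are pairwise disjoint, so the elif chain's filters equal plain membership filters
theorem names_disj₁ (l : String) (h : l ∈ textNames) :
    l ∉ idNames ∧ l ∉ questionNames ∧ l ∉ answerNames := by
  simp [textNames] at h
  rcases h with rfl | rfl | rfl | rfl | rfl | rfl <;> decide

theorem names_disj₂ (l : String) (h : l ∈ idNames) :
    l ∉ questionNames ∧ l ∉ answerNames := by
  simp [idNames] at h
  rcases h with rfl | rfl | rfl | rfl <;> decide

theorem names_disj₃ (l : String) (h : l ∈ questionNames) :
    l ∉ answerNames := by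
  simp [questionNames] at h
  rcases h with rfl | rfl | rfl | rfl <;> decide

theorem sf_fold_spec (columns : List String) (t i q a : List String) :
    columns.foldl sfStep (t, i, q, a) =
      (t ++ columns.filter (fun c => textNames.contains (PySem.Str.lower c)),
       i ++ columns.filter (fun c => idNames.contains (PySem.Str.lower c)),
       q ++ columns.filter (fun c => questionNames.contains (PySem.Str.lower c)),
       a ++ columns.filter (fun c => answerNames.contains (PySem.Str.lower c))) := by
  induction columns generalizing t i q a with
  | nil => simp
  | cons c cs ih =>
    by_cases hT : PySem.Str.lower c ∈ textNames
    · obtain ⟨hI, hQ, hA⟩ := names_disj₁ _ hT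
      simp [sfStep, hT, hI, hQ, hA, ih]
    · by_cases hI : PySem.Str.lower c ∈ idNames
      · obtain ⟨hQ, hA⟩ := names_disj₂ _ hI
        simp [sfStep, hT, hI, hQ, hA, ih]
      · by_cases hQ : PySem.Str.lower c ∈ questionNames
        · have hA := names_disj₃ _ hQ
          simp [sfStep, hT, hI, hQ, hA, ih]
        · by_cases hA : PySem.Str.lower c ∈ answerNames <;>
            simp [sfStep, hT, hI, hQ, hA, ih]

-- ===== VERDICT (by name: the statement is the Claim_ definition above) =====
theorem suggest_fields_spec : Claim_equal_suggest_fields := by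
  intro columns _
  unfold Spec_suggest_fields suggest_fields suggest_fields_alt
  simp [sf_fold_spec]
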